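-- pv_equiv track=rewrite | github.com/5l1v3r1/CS5331-Homework-3 | tools/directory_traversal.py | prepare_paths
-- ===== SOURCE A (Python) =====
-- def prepare_paths(depth, file):
--     path = "./"
--     paths = []
--     for x in range(1, depth):
--         path += "../"
--         test = path + file
--         paths.append(test)
--     return paths #[./../etc/passwd , ./../../etc/passwd, ./../../../etc/passwd, ....]
-- ===== SOURCE B (Python) =====
-- def prepare_paths(depth, file):
--     # Each path is computed directly from its index: no cross-iteration accumulator.
--     return ['./' + '../' * x + file for x in range(1, depth)]
-- ===== Notes on version B (the rewrite author's own statement) =====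
-- stated objective: idiomatic
-- what changed: Replaced the accumulating loop (running 'path' string mutated each iteration) with a list comprehension computing each element independently in closed form as './' + '../'*x + file.
import Mathlib
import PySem

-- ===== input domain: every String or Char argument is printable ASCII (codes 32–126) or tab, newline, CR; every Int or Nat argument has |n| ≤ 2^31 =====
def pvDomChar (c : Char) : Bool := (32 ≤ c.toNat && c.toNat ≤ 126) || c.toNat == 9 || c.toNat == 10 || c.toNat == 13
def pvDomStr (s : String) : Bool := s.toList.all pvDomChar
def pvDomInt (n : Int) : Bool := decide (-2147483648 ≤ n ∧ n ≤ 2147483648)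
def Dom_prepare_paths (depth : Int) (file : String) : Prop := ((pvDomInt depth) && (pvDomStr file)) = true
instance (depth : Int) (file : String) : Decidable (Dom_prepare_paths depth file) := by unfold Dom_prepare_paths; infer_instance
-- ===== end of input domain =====

-- B replaces A's cross-iteration string accumulator with a comprehension building each path independently with '../'*x (idiomatic; same cost).

-- ===== PORT A =====
-- literal port: accumulator (path, paths); path += "../" then paths.append(path + file), over range(1, depth)
def prepare_paths (depth : Int) (file : String) : List String :=
  (((PySem.List.pyRange 1 depth 1).foldl
      (fun (st : List Char × List String) _x =>
        let path := st.1 ++ "../".toList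
        let test := path ++ file.toList
        (path, st.2 ++ [String.ofList test]))
      ("./".toList, [])).2)

-- ===== PORT B =====
-- literal port of Source B: ['./' + '../'*x + file for x in range(1, depth)]
def prepare_paths_alt (depth : Int) (file : String) : List String :=
  (PySem.List.pyRange 1 depth 1).map
    (fun x => String.ofList ("./".toList ++ PySem.List.pyRepeat "../".toList x ++ file.toList))

-- ===== PRECONDITION & SPEC =====
def Spec_prepare_paths (depth : Int) (file : String) (out : List String) : Prop := out = prepare_paths_alt depth file
instance (depth : Int) (file : String) (out : List String) : Decidable (Spec_prepare_paths depth file out) := by unfold Spec_prepare_paths; infer_instance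

-- ===== CLAIM (what is proved, stated in full; the proofs are below) =====
def Claim_equal_prepare_paths : Prop := ∀ (depth : Int) (file : String), Dom_prepare_paths depth file → Spec_prepare_paths depth file (prepare_paths depth file)

-- ===== LEMMAS AND PROOFS =====

theorem pyRepeat_eq_flatten_replicate {α : Type} (xs : List α) (n : Int) :
    PySem.List.pyRepeat xs n = (List.replicate n.toNat xs).flatten := by
  simp [PySem.List.pyRepeat]

-- loop invariant: after processing range(1, 1+n), path holds n copies of "../" and
-- paths holds exactly B's elements for x = 1 .. n
theorem prepare_paths_loop (file : String) : ∀ (n : Nat),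
    ((PySem.List.pyRange 1 (1 + (n : Int)) 1).foldl
      (fun (st : List Char × List String) _x =>
        let path := st.1 ++ "../".toList
        let test := path ++ file.toList
        (path, st.2 ++ [String.ofList test]))
      ("./".toList, []))
    = ("./".toList ++ (List.replicate n "../".toList).flatten,
       (PySem.List.pyRange 1 (1 + (n : Int)) 1).map
         (fun x => String.ofList ("./".toList ++ PySem.List.pyRepeat "../".toList x ++ file.toList))) := by
  intro n
  induction n with
  | zero =>
    rw [PySem.List.pyRange_one_eq_nil (by omega)]
    simp
  | succ m ih =>
    have hsplit : PySem.List.pyRange 1 (1 + ((m + 1 : Nat) : Int)) 1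
        = PySem.List.pyRange 1 (1 + (m : Int)) 1 ++ [1 + (m : Int)] := by
      have h := PySem.List.pyRange_one_succ_right (a := 1) (b := 1 + (m : Int)) (by omega)
      rw [show (1 : Int) + ((m + 1 : Nat) : Int) = (1 + (m : Int)) + 1 by push_cast; ring]
      exact h
    rw [hsplit, List.foldl_append, List.map_append, ih]
    simp only [List.foldl_cons, List.foldl_nil, List.map_cons, List.map_nil]
    have h1 : (List.replicate (m + 1) "../".toList).flatten
        = (List.replicate m "../".toList).flatten ++ "../".toList := by
      rw [List.replicate_succ']; simp
    have h2 : PySem.List.pyRepeat "../".toList (1 + (m : Int))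
        = (List.replicate m "../".toList).flatten ++ "../".toList := by
      rw [pyRepeat_eq_flatten_replicate, show ((1 : Int) + (m : Int)).toNat = m + 1 by omega, h1]
    rw [h1, h2]
    simp [List.append_assoc]

theorem prepare_paths_eq (depth : Int) (file : String) :
    prepare_paths depth file = prepare_paths_alt depth file := by
  unfold prepare_paths prepare_paths_alt
  by_cases h : depth ≤ 1
  · rw [PySem.List.pyRange_one_eq_nil h]
    simp
  · have hd : depth = 1 + ((depth - 1).toNat : Int) := by omega
    rw [hd, prepare_paths_loop]

-- ===== VERDICT (by name: the statement is the Claim_ definition above) =====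
theorem prepare_paths_spec : Claim_equal_prepare_paths := by
  intro depth file _
  exact prepare_paths_eq depth file
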